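-- pv_equiv track=rewrite | github.com/Sterling-Miller/CS-211 | Mini-Projects/Mini-Project-4/waldo.py | all_col_exists_waldo
-- ===== SOURCE A (Python) =====
-- Waldo = 'w'
--
-- def all_col_exists_waldo(board):
--     """ For all columns in the matrix, Waldo is in some row """
--     if len(board) > 0:
--         for col in range(len(board[0])):
--             for row in range(len(board)):
--                 if board[row][col] == Waldo:
--                     break
--                 if row == (len(board) - 1):
--                     return False
--     return True
-- ===== SOURCE B (Python) =====
-- Waldo = 'w'
--
-- def all_col_exists_waldo(board):
--     """ For all columns in the matrix, Waldo is in some row """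
--     if len(board) == 0:
--         return True
--     cols = len(board[0])
--     found = set()
--     for row in board:
--         for c in range(cols):
--             if row[c] == Waldo:
--                 found.add(c)
--     return len(found) == cols
-- ===== Notes on version B (the rewrite author's own statement) =====
-- stated objective: alternative
-- what changed: Replaces the per-column nested scan with early break/return by a single full scan that collects satisfied column indices into a set and compares its size with the column count.
-- outside the precondition, e.g. on all_col_exists_waldo([['w', 'w'], ['w']]): A returns True, B raises IndexError
import Mathlib
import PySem

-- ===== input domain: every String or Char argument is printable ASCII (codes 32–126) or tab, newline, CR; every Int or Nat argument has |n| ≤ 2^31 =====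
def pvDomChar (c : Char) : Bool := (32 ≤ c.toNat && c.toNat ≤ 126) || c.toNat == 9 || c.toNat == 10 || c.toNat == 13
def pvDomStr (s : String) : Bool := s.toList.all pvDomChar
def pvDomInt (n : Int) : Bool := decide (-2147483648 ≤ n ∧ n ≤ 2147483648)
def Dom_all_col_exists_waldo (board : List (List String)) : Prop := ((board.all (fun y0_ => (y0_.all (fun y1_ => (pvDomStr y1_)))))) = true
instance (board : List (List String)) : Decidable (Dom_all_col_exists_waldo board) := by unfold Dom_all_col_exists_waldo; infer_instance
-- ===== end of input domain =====

-- B replaces the per-column scan with break/early-return by one full scan collecting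
-- satisfied column indices into a set, then comparing its size with the column count (objective: alternative).

-- ===== PORT A =====
-- inner 'for row in range(len(board))' loop: true = 'break' happened, false = 'return False'
def pvAInner (rows : List (List String)) (idx total : Nat) (col : Int) : Bool :=
  match rows with
  | [] => true  -- loop ends without break/return (unreachable for nonempty board)
  | r :: rest =>
    if PySem.List.pyGet? r col = some "w" then true
    else if idx = total - 1 then false
    else pvAInner rest (idx + 1) total col

def all_col_exists_waldo (board : List (List String)) : Bool :=
  if board.length > 0 then
    -- 'for col in range(len(board[0])): … return False' = all columns pass
    (PySem.List.pyRange 0 ((board.headD []).length : Int) 1).all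
      (fun col => pvAInner board 0 board.length col)
  else true

-- ===== PORT B =====
def pvBScan (board : List (List String)) (cols : Int) : PySem.Set Int :=
  board.foldl
    (fun s r =>
      (PySem.List.pyRange 0 cols 1).foldl
        (fun s c => if PySem.List.pyGet? r c = some "w" then PySem.Set.add s c else s) s)
    PySem.Set.empty

def all_col_exists_waldo_alt (board : List (List String)) : Bool :=
  if board.length = 0 then true
  else
    let cols : Int := ((board.headD []).length : Int)
    decide (PySem.Set.len (pvBScan board cols) = cols)

-- ===== PRECONDITION & SPEC =====
-- Pre_ excludes ragged boards having a row shorter than the first row: there Python A's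
-- returning at all is accidental (it depends on where Waldo sits; A may raise IndexError),
-- and B raises IndexError on its full scan.
def Pre_all_col_exists_waldo (board : List (List String)) : Prop :=
  ∀ r ∈ board, (board.headD []).length ≤ r.length
instance (board : List (List String)) : Decidable (Pre_all_col_exists_waldo board) := by
  unfold Pre_all_col_exists_waldo; infer_instance

def pvWitness_all_col_exists_waldo : List (List String) := [["w", "x"], ["y", "w"]]

def Spec_all_col_exists_waldo (board : List (List String)) (out : Bool) : Prop := out = all_col_exists_waldo_alt board
instance (board : List (List String)) (out : Bool) : Decidable (Spec_all_col_exists_waldo board out) := by unfold Spec_all_col_exists_waldo; infer_instance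

-- ===== CLAIM (what is proved, stated in full; the proofs are below) =====
def Claim_equal_all_col_exists_waldo : Prop := ∀ (board : List (List String)), Dom_all_col_exists_waldo board → Pre_all_col_exists_waldo board → Spec_all_col_exists_waldo board (all_col_exists_waldo board)

-- ===== LEMMAS AND PROOFS =====

-- A's inner loop, characterised: on a nonempty suffix whose last element has index total-1,
-- it returns true iff some row has "w" at col.
theorem pvAInner_eq_any (rows : List (List String)) (idx total : Nat) (col : Int)
    (hne : rows ≠ []) (hlen : idx + rows.length = total) :
    pvAInner rows idx total col = rows.any (fun r => PySem.List.pyGet? r col = some "w") := by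
  induction rows generalizing idx with
  | nil => exact absurd rfl hne
  | cons r rest ih =>
    simp only [pvAInner, List.any_cons]
    by_cases hw : PySem.List.pyGet? r col = some "w"
    · simp [hw]
    · simp only [hw, if_false]
      cases rest with
      | nil =>
        have : idx = total - 1 := by simp at hlen; omega
        simp [this]
      | cons r2 rest2 =>
        have hne2 : idx ≠ total - 1 := by simp at hlen; omega
        rw [if_neg hne2, ih (idx + 1) (by simp) (by simp at hlen ⊢; omega)]
        simp

-- B's scan, membership characterisation.
theorem mem_pvBScan_aux (rows : List (List String)) (cols : Int) (s : PySem.Set Int) (x : Int) :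
    x ∈ rows.foldl
      (fun s r => (PySem.List.pyRange 0 cols 1).foldl
        (fun s c => if PySem.List.pyGet? r c = some "w" then PySem.Set.add s c else s) s) s
    ↔ x ∈ s ∨ (x ∈ PySem.List.pyRange 0 cols 1 ∧
        ∃ r ∈ rows, PySem.List.pyGet? r x = some "w") := by
  induction rows generalizing s with
  | nil => simp
  | cons r rest ih =>
    rw [List.foldl_cons, ih]
    have hrow : ∀ (t : PySem.Set Int),
        x ∈ (PySem.List.pyRange 0 cols 1).foldl
          (fun s c => if PySem.List.pyGet? r c = some "w" then PySem.Set.add s c else s) t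
        ↔ x ∈ t ∨ (x ∈ PySem.List.pyRange 0 cols 1 ∧ PySem.List.pyGet? r x = some "w") := by
      intro t
      generalize PySem.List.pyRange 0 cols 1 = L
      induction L generalizing t with
      | nil => simp
      | cons c cs ihc =>
        rw [List.foldl_cons, ihc]
        by_cases hc : PySem.List.pyGet? r c = some "w"
        · simp only [hc, if_true, PySem.Set.mem_add]
          constructor
          · rintro (⟨h | rfl⟩ | ⟨h1, h2⟩)
            · exact Or.inl h
            · exact Or.inr ⟨List.mem_cons_self, hc⟩
            · exact Or.inr ⟨List.mem_cons_of_mem _ h1, h2⟩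
          · rintro (h | ⟨h1, h2⟩)
            · exact Or.inl (Or.inl h)
            · rcases List.mem_cons.mp h1 with rfl | h1
              · exact Or.inl (Or.inr rfl)
              · exact Or.inr ⟨h1, h2⟩
        · simp only [hc, if_false]
          constructor
          · rintro (h | ⟨h1, h2⟩)
            · exact Or.inl h
            · exact Or.inr ⟨List.mem_cons_of_mem _ h1, h2⟩
          · rintro (h | ⟨h1, h2⟩)
            · exact Or.inl h
            · rcases List.mem_cons.mp h1 with rfl | h1
              · exact absurd h2 hc
              · exact Or.inr ⟨h1, h2⟩
    rw [hrow]
    constructor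
    · rintro ((h | ⟨h1, h2⟩) | ⟨h1, r', hr', h2⟩)
      · exact Or.inl h
      · exact Or.inr ⟨h1, r, List.mem_cons_self, h2⟩
      · exact Or.inr ⟨h1, r', List.mem_cons_of_mem _ hr', h2⟩
    · rintro (h | ⟨h1, r', hr', h2⟩)
      · exact Or.inl (Or.inl h)
      · rcases List.mem_cons.mp hr' with rfl | hr'
        · exact Or.inl (Or.inr ⟨h1, h2⟩)
        · exact Or.inr ⟨h1, r', hr', h2⟩

theorem mem_pvBScan (board : List (List String)) (cols : Int) (x : Int) :
    x ∈ pvBScan board cols ↔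
      x ∈ PySem.List.pyRange 0 cols 1 ∧ ∃ r ∈ board, PySem.List.pyGet? r x = some "w" := by
  rw [pvBScan, mem_pvBScan_aux]
  simp [PySem.Set.empty]

theorem nodup_pvBScan_aux (rows : List (List String)) (cols : Int) (s : PySem.Set Int)
    (hs : s.Nodup) :
    (rows.foldl
      (fun s r => (PySem.List.pyRange 0 cols 1).foldl
        (fun s c => if PySem.List.pyGet? r c = some "w" then PySem.Set.add s c else s) s) s).Nodup := by
  induction rows generalizing s with
  | nil => exact hs
  | cons r rest ih =>
    rw [List.foldl_cons]
    apply ih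
    clear ih
    generalize PySem.List.pyRange 0 cols 1 = L
    induction L generalizing s with
    | nil => exact hs
    | cons c cs ihc =>
      rw [List.foldl_cons]
      apply ihc
      by_cases hc : PySem.List.pyGet? r c = some "w"
      · simpa [hc] using PySem.Set.nodup_add (s := s) (x := c) hs
      · simpa [hc] using hs

theorem nodup_pvBScan (board : List (List String)) (cols : Int) : (pvBScan board cols).Nodup := by
  exact nodup_pvBScan_aux _ _ _ List.nodup_nil

-- sized-subset argument: B's length test ↔ every column index is in the scan set
theorem pvBScan_len_iff (board : List (List String)) (cols : Int) (hc0 : 0 ≤ cols) :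
    (PySem.Set.len (pvBScan board cols) = cols) ↔
      ∀ c ∈ PySem.List.pyRange 0 cols 1, c ∈ pvBScan board cols := by
  have hsub : pvBScan board cols ⊆ PySem.List.pyRange 0 cols 1 := by
    intro x hx; exact ((mem_pvBScan board cols x).mp hx).1
  have hsp : (pvBScan board cols).Subperm (PySem.List.pyRange 0 cols 1) :=
    (nodup_pvBScan board cols).subperm hsub
  constructor
  · intro hlen c hc
    have hlen' : (PySem.List.pyRange 0 cols 1).length ≤ (pvBScan board cols).length := by
      have := PySem.List.length_pyRange_one (a := 0) (b := cols)
      simp only [PySem.Set.len] at hlen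
      omega
    exact (hsp.perm_of_length_le hlen').symm.mem_iff.mp hc
  · intro hall
    have hsub2 : (PySem.List.pyRange 0 cols 1).Subperm (pvBScan board cols) :=
      List.Nodup.subperm (PySem.List.nodup_pyRange_one 0 cols) hall
    have h1 := hsp.length_le
    have h2 := hsub2.length_le
    have := PySem.List.length_pyRange_one (a := 0) (b := cols)
    simp only [PySem.Set.len]
    omega

-- ===== VERDICT (by name: the statement is the Claim_ definition above) =====
theorem all_col_exists_waldo_spec : Claim_equal_all_col_exists_waldo := by
  intro board _ hpre
  unfold Spec_all_col_exists_waldo all_col_exists_waldo all_col_exists_waldo_alt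
  cases board with
  | nil => simp
  | cons r0 rest =>
    simp only [List.length_cons, Nat.zero_lt_succ, if_true, Nat.succ_ne_zero, if_false,
      gt_iff_lt]
    set board := r0 :: rest with hb
    rw [Bool.eq_iff_iff, List.all_eq_true, decide_eq_true_iff, pvBScan_len_iff _ _ (by positivity)]
    apply forall_congr'
    intro col
    constructor
    · intro h hc
      have := h hc
      rw [pvAInner_eq_any board 0 (rest.length + 1) col (by simp [hb]) (by simp [hb])] at this
      rw [mem_pvBScan]
      refine ⟨hc, ?_⟩
      simpa using this
    · intro h hc
      have := h hc
      rw [mem_pvBScan] at this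
      rw [pvAInner_eq_any board 0 (rest.length + 1) col (by simp [hb]) (by simp [hb])]
      simpa using this.2
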